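-- pv_equiv track=rewrite | github.com/gingeratx68/CS303E | Mockexam2.py | setOfCommonFactors
-- ===== SOURCE A (Python) =====
-- def setOfCommonFactors(lst):
--     # replace pass with your solution to problem 6 here
--     """good=[]
--     mini=min(lst)
--     for i in range(lst):
--         facto=False
--         for x in lst:
--             if x%i==0:
--                 facto=True
--         if facto:
--             good.append(i)
--         return good"""
--     factors = [] # creating a list to store the factors of all the numbers
--     for i in lst: #then iterating in the tuple
--         temp = [] # and creating a temporary list to store the factors
--         for j in range(1,i+1): # then iterating in the range
--             if i%j == 0: # and appending into temp all the numbers that are factors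
--                 temp.append(j)
--         factors.append(set(temp))
--     common = factors[0] # then taking another variable and initialising it with factor
--     for i in factors:
--         common = common.intersection(i) # then using the intersection getting all the common factors
--     return sorted(common) # returning the sorted function
-- ===== SOURCE B (Python) =====
-- def _gcd(a, b):
--     while b:
--         a, b = b, a % b
--     return a
--
--
-- def setOfCommonFactors(lst):
--     # A factor of i is a j with 1 <= j <= i dividing i, so any non-positive
--     # number has no factors and the common set is empty.
--     if min(lst) <= 0:
--         return []
--     g = 0
--     for x in lst:
--         g = _gcd(g, x)
--     # the common factors of all numbers are exactly the divisors of their gcd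
--     return [d for d in range(1, g + 1) if g % d == 0]
-- ===== Notes on version B (the rewrite author's own statement) =====
-- stated objective: faster
-- what changed: B replaces A's per-element full factor enumeration (range 1..i for every i) plus repeated set intersections by a single Euclid-gcd fold over the list followed by one divisor scan of the gcd, returning [] directly when the minimum is non-positive.
import Mathlib
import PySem

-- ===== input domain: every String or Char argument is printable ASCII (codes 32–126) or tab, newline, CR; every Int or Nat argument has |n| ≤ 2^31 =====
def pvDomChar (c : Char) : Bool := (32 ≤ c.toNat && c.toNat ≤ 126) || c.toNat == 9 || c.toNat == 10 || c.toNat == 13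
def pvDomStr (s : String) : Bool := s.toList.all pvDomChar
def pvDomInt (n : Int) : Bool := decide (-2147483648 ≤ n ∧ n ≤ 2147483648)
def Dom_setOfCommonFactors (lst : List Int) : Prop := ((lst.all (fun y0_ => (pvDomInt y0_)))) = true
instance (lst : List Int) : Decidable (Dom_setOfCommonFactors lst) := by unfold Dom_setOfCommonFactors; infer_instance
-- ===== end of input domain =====

-- B replaces A's per-element factor enumeration plus set intersection by a gcd fold
-- (Euclid) and one divisor scan of the gcd (objective: faster).

-- ===== PORT A =====
-- factors of one element i: 'temp' built by the inner loop, then set(temp)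
def pvFactorSet (i : Int) : PySem.Set Int :=
  PySem.Set.ofList
    ((PySem.List.pyRange 1 (i + 1) 1).foldl
      (fun temp j => if PySem.Int.mod i j == 0 then temp ++ [j] else temp) [])

def setOfCommonFactors (lst : List Int) : List Int :=
  let factors := lst.foldl (fun fs i => fs ++ [pvFactorSet i]) []
  match factors with
  | [] => []          -- Python indexes the factors list here and raises IndexError; excluded by Pre_
  | f0 :: _ =>
    let common := factors.foldl (fun c s => PySem.Set.inter c s) f0
    PySem.List.sorted common (fun x => x) false

-- ===== PORT B =====
-- termination measure for Euclid's loop (cited by pyGcd's decreasing_by)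
theorem pvModNatAbsLt (a b : Int) (h : ¬ b = 0) :
    (PySem.Int.mod a b).natAbs < b.natAbs := by
  rcases lt_or_gt_of_ne h with hb | hb
  · have := PySem.Int.mod_neg_bounds a hb; omega
  · have h1 := PySem.Int.mod_nonneg a hb; have h2 := PySem.Int.mod_lt a hb; omega

-- _gcd: while b: a, b = b, a % b
def pyGcd (a b : Int) : Int :=
  if h : b = 0 then a else pyGcd b (PySem.Int.mod a b)
termination_by b.natAbs
decreasing_by exact pvModNatAbsLt a b h

def setOfCommonFactors_alt (lst : List Int) : List Int :=
  match PySem.List.min? lst (fun x => x) with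
  | none => []        -- Python's min of an empty sequence raises ValueError; excluded by Pre_
  | some m =>
    if m ≤ 0 then []
    else
      let g := lst.foldl pyGcd 0
      (PySem.List.pyRange 1 (g + 1) 1).filter (fun d => PySem.Int.mod g d == 0)

-- ===== PRECONDITION & SPEC =====
-- A indexes its factors list at position zero (and B takes a minimum): both raise on an empty input list, excluded here.
def Pre_setOfCommonFactors (lst : List Int) : Prop := lst ≠ []
instance (lst : List Int) : Decidable (Pre_setOfCommonFactors lst) := by
  unfold Pre_setOfCommonFactors; infer_instance

def pvWitness_setOfCommonFactors : List Int := [6, 4]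

def Spec_setOfCommonFactors (lst : List Int) (out : List Int) : Prop := out = setOfCommonFactors_alt lst
instance (lst : List Int) (out : List Int) : Decidable (Spec_setOfCommonFactors lst out) := by unfold Spec_setOfCommonFactors; infer_instance

-- ===== CLAIM (what is proved, stated in full; the proofs are below) =====
def Claim_equal_setOfCommonFactors : Prop := ∀ (lst : List Int), Dom_setOfCommonFactors lst → Pre_setOfCommonFactors lst → Spec_setOfCommonFactors lst (setOfCommonFactors lst)

-- ===== LEMMAS AND PROOFS =====

-- A's per-element set is the filtered range itself
theorem pvFactorSet_eq (i : Int) :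
    pvFactorSet i
      = (PySem.List.pyRange 1 (i + 1) 1).filter (fun j => PySem.Int.mod i j == 0) := by
  unfold pvFactorSet
  rw [PySem.List.foldl_append_if_eq_filter]
  exact PySem.Set.ofList_eq_self_of_nodup _
    ((PySem.List.nodup_pyRange_one 1 (i + 1)).filter _)

theorem pvMem_factorSet (i y : Int) :
    y ∈ pvFactorSet i ↔ 1 ≤ y ∧ y < i + 1 ∧ y ∣ i := by
  rw [pvFactorSet_eq, List.mem_filter, PySem.List.mem_pyRange_one]
  simp [PySem.Int.mod_eq_zero_iff_dvd]
  tauto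

theorem pvMem_foldl_inter (ss : List (PySem.Set Int)) (c : PySem.Set Int) (y : Int) :
    y ∈ ss.foldl (fun c s => PySem.Set.inter c s) c ↔ y ∈ c ∧ ∀ s ∈ ss, y ∈ s := by
  induction ss generalizing c with
  | nil => simp
  | cons s t ih =>
    simp only [List.foldl_cons, ih, PySem.Set.mem_inter, List.mem_cons]
    constructor
    · rintro ⟨⟨h1, h2⟩, h3⟩
      exact ⟨h1, fun u hu => by rcases hu with rfl | hu; exacts [h2, h3 u hu]⟩
    · rintro ⟨h1, h2⟩
      exact ⟨⟨h1, h2 s (Or.inl rfl)⟩, fun u hu => h2 u (Or.inr hu)⟩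

theorem pvNodup_foldl_inter (ss : List (PySem.Set Int)) (c : PySem.Set Int)
    (hc : c.Nodup) : (ss.foldl (fun c s => PySem.Set.inter c s) c).Nodup := by
  induction ss generalizing c with
  | nil => exact hc
  | cons s t ih => exact ih _ (PySem.Set.nodup_inter _ _ hc)

-- Euclid's gcd: divides both arguments, is nonnegative, and is divided by any common divisor
theorem pvPyGcd_spec (a b : Int) : 0 ≤ a → 0 ≤ b →
    0 ≤ pyGcd a b ∧ pyGcd a b ∣ a ∧ pyGcd a b ∣ b ∧
      ∀ y : Int, y ∣ a → y ∣ b → y ∣ pyGcd a b := by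
  induction a, b using pyGcd.induct with
  | case1 a =>
    intro ha _
    rw [pyGcd, dif_pos rfl]
    exact ⟨ha, dvd_refl a, dvd_zero a, fun y h _ => h⟩
  | case2 a b hb0 ih =>
    intro _ hb
    have hbpos : 0 < b := lt_of_le_of_ne hb (Ne.symm hb0)
    have hmod : PySem.Int.mod a b = a % b := PySem.Int.mod_eq_emod_of_pos hbpos
    have hr : 0 ≤ PySem.Int.mod a b := PySem.Int.mod_nonneg a hbpos
    obtain ⟨h0, h1, h2, h3⟩ := ih hb hr
    rw [pyGcd, dif_neg hb0]
    refine ⟨h0, ?_, h1, ?_⟩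
    · have hdvd : pyGcd b (PySem.Int.mod a b) ∣ b * (a / b) + a % b :=
        dvd_add (Dvd.dvd.mul_right h1 _) (hmod ▸ h2)
      rwa [Int.mul_ediv_add_emod] at hdvd
    · intro y hya hyb
      refine h3 y hyb ?_
      rw [hmod, Int.emod_def]
      exact dvd_sub hya (Dvd.dvd.mul_right hyb _)

-- the gcd fold over the whole list
theorem pvFoldl_pyGcd_spec (l : List Int) (a : Int) (hl : ∀ i ∈ l, 0 ≤ i) (ha : 0 ≤ a) :
    0 ≤ l.foldl pyGcd a ∧ l.foldl pyGcd a ∣ a ∧ (∀ i ∈ l, l.foldl pyGcd a ∣ i) ∧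
      ∀ y : Int, y ∣ a → (∀ i ∈ l, y ∣ i) → y ∣ l.foldl pyGcd a := by
  induction l generalizing a with
  | nil => exact ⟨ha, dvd_refl a, by simp, fun y h _ => h⟩
  | cons x t ih =>
    have hx : 0 ≤ x := hl x (List.mem_cons_self)
    obtain ⟨g0, g1, g2, g3⟩ := pvPyGcd_spec a x ha hx
    obtain ⟨f0, f1, f2, f3⟩ := ih (pyGcd a x) (fun i hi => hl i (List.mem_cons_of_mem _ hi)) g0
    simp only [List.foldl_cons]
    refine ⟨f0, f1.trans g1, ?_, ?_⟩
    · intro i hi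
      rcases List.mem_cons.mp hi with rfl | hi
      · exact f1.trans g2
      · exact f2 i hi
    · intro y hya hyl
      exact f3 y (g3 y hya (hyl x List.mem_cons_self))
        (fun i hi => hyl i (List.mem_cons_of_mem _ hi))

-- ===== VERDICT (by name: the statement is the Claim_ definition above) =====
theorem setOfCommonFactors_spec : Claim_equal_setOfCommonFactors := by
  intro lst _ hpre
  obtain ⟨x0, xs, rfl⟩ := List.exists_cons_of_ne_nil hpre
  obtain ⟨m, hm⟩ : ∃ m, PySem.List.min? (x0 :: xs) (fun x => x) = some m :=
    ⟨_, PySem.List.min?_id_cons x0 xs⟩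
  have hmmem : m ∈ x0 :: xs := PySem.List.min?_mem hm
  have hmmin : ∀ y ∈ x0 :: xs, m ≤ y := PySem.List.min?_isMin hm
  have halt : setOfCommonFactors_alt (x0 :: xs) =
      if m ≤ 0 then []
      else (PySem.List.pyRange 1 ((x0 :: xs).foldl pyGcd 0 + 1) 1).filter
        (fun d => PySem.Int.mod ((x0 :: xs).foldl pyGcd 0) d == 0) := by
    unfold setOfCommonFactors_alt
    rw [hm]
  unfold Spec_setOfCommonFactors setOfCommonFactors
  rw [PySem.List.foldl_append_singleton_eq_map, halt]
  simp only [List.nil_append, List.map_cons]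
  by_cases hm0 : m ≤ 0
  · -- some element is ≤ 0: its factor set is empty, so the intersection is empty
    rw [if_pos hm0]
    have hcomm : ((pvFactorSet x0 :: xs.map pvFactorSet).foldl
        (fun c s => PySem.Set.inter c s) (pvFactorSet x0)) = [] := by
      rw [List.eq_nil_iff_forall_not_mem]
      intro y hy
      rw [pvMem_foldl_inter] at hy
      have hyFm : y ∈ pvFactorSet m := by
        rcases List.mem_cons.mp hmmem with rfl | hmem
        · exact hy.1
        · exact hy.2 _ (List.mem_cons_of_mem _ (List.mem_map_of_mem hmem))
      have := (pvMem_factorSet m y).mp hyFm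
      omega
    rw [hcomm]
    rfl
  · -- all elements positive: common factors = divisors of the gcd
    rw [if_neg hm0]
    rw [not_le] at hm0
    have hpos : ∀ i ∈ x0 :: xs, 0 < i := fun i hi => lt_of_lt_of_le hm0 (hmmin i hi)
    obtain ⟨g0, -, g2, g3⟩ := pvFoldl_pyGcd_spec (x0 :: xs) 0
      (fun i hi => le_of_lt (hpos i hi)) le_rfl
    have hgpos : 0 < (x0 :: xs).foldl pyGcd 0 := by
      rcases lt_or_eq_of_le g0 with h | h
      · exact h
      · exfalso
        have hx0 : (x0 :: xs).foldl pyGcd 0 ∣ x0 := g2 x0 List.mem_cons_self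
        rw [← h] at hx0
        have := hpos x0 List.mem_cons_self
        omega
    apply PySem.List.sorted_eq_of_perm_of_pairwise_lt
    · -- B's list is a permutation of A's intersection set
      have hnodupB : ((PySem.List.pyRange 1 ((x0 :: xs).foldl pyGcd 0 + 1) 1).filter
          (fun d => PySem.Int.mod ((x0 :: xs).foldl pyGcd 0) d == 0)).Nodup :=
        (PySem.List.nodup_pyRange_one 1 ((x0 :: xs).foldl pyGcd 0 + 1)).filter _
      have hnodupA : ((pvFactorSet x0 :: xs.map pvFactorSet).foldl
          (fun c s => PySem.Set.inter c s) (pvFactorSet x0)).Nodup :=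
        pvNodup_foldl_inter _ _ (by rw [pvFactorSet_eq]
                                    exact (PySem.List.nodup_pyRange_one 1 (x0 + 1)).filter _)
      rw [List.perm_ext_iff_of_nodup hnodupB hnodupA]
      intro y
      rw [List.mem_filter, PySem.List.mem_pyRange_one, pvMem_foldl_inter]
      simp only [beq_iff_eq, PySem.Int.mod_eq_zero_iff_dvd]
      constructor
      · rintro ⟨⟨hy1, _⟩, hyg⟩
        have hall : ∀ i ∈ x0 :: xs, y ∈ pvFactorSet i := by
          intro i hi
          rw [pvMem_factorSet]
          have hdvd : y ∣ i := hyg.trans (g2 i hi)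
          have : y ≤ i := Int.le_of_dvd (hpos i hi) hdvd
          exact ⟨hy1, by omega, hdvd⟩
        refine ⟨hall x0 List.mem_cons_self, ?_⟩
        intro s hs
        rcases List.mem_cons.mp hs with rfl | hs
        · exact hall x0 List.mem_cons_self
        · rcases List.mem_map.mp hs with ⟨i, hi, rfl⟩
          exact hall i (List.mem_cons_of_mem _ hi)
      · rintro ⟨hy0, hyall⟩
        have hdvdall : ∀ i ∈ x0 :: xs, y ∣ i := by
          intro i hi
          rcases List.mem_cons.mp hi with rfl | hi
          · exact ((pvMem_factorSet i y).mp hy0).2.2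
          · exact ((pvMem_factorSet i y).mp
              (hyall _ (List.mem_cons_of_mem _ (List.mem_map_of_mem hi)))).2.2
        have hy1 : 1 ≤ y := ((pvMem_factorSet x0 y).mp hy0).1
        have hyg : y ∣ (x0 :: xs).foldl pyGcd 0 := g3 y (dvd_zero y) hdvdall
        have := Int.le_of_dvd hgpos hyg
        exact ⟨⟨hy1, by omega⟩, hyg⟩
    · -- B's list is strictly increasing
      exact List.Pairwise.filter _
        (PySem.List.pairwise_lt_pyRange_one 1 ((x0 :: xs).foldl pyGcd 0 + 1))
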